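-- pv_equiv track=rewrite | github.com/mshivaramreddy/neetCode50 | arrays/08.longestConsecutive/sorting.py | longConsecutive
-- ===== SOURCE A (Python) =====
-- from typing import List
--
-- def longConsecutive(nums: List[int]) -> int:
--     a = sorted(nums)
--     result = 0
--     for i in range(len(a)):
--         for j in range(i+1, len(a)):
--             if nums[i]+1 == nums[j]:
--                 result += 1
--     return result
-- ===== SOURCE B (Python) =====
-- def longConsecutive(nums):
--     seen = {}
--     result = 0
--     for x in nums:
--         result += seen.get(x - 1, 0)
--         seen[x] = seen.get(x, 0) + 1
--     return result
-- ===== Notes on version B (the rewrite author's own statement) =====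
-- stated objective: faster
-- what changed: Replaces the quadratic nested index loops with a single left-to-right pass that keeps a hash map of counts of values seen so far and adds the count of x-1 at each element.
import Mathlib
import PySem

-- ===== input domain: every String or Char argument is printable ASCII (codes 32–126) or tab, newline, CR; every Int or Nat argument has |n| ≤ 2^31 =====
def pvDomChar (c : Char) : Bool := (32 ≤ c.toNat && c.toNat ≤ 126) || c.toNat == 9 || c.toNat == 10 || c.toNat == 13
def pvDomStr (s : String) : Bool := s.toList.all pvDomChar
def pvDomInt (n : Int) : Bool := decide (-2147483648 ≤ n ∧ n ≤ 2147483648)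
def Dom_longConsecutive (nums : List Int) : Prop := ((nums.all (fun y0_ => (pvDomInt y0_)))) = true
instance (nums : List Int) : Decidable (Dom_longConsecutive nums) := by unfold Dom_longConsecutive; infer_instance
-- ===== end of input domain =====

-- B replaces A's O(n^2) nested index loops by one pass with a hash map of counts
-- of the values seen so far (measured asymptotically faster in Python).

-- ===== PORT A =====
-- literal port of A: a = sorted(nums); nested index loops over range(len(a)),
-- test nums[i]+1 == nums[j] (indices are always in range, so nums[i] is pyGetD).
def longConsecutive (nums : List Int) : Int :=
  let a := PySem.List.sorted nums (fun x => x) false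
  (PySem.List.pyRange 0 (PySem.List.len a) 1).foldl (fun result i =>
    (PySem.List.pyRange (i + 1) (PySem.List.len a) 1).foldl (fun result j =>
      if PySem.List.pyGetD nums i 0 + 1 = PySem.List.pyGetD nums j 0 then result + 1
      else result) result) 0

-- ===== PORT B =====
-- literal port of Source B: state (seen, result); result += seen.get(x-1,0); seen[x] = seen.get(x,0)+1
def longConsecutive_alt (nums : List Int) : Int :=
  (nums.foldl (fun (st : PySem.Dict Int Int × Int) x =>
      (st.1.insert x (st.1.getD x 0 + 1), st.2 + st.1.getD (x - 1) 0))
    (PySem.Dict.empty, 0)).2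

-- ===== PRECONDITION & SPEC =====
def Spec_longConsecutive (nums : List Int) (out : Int) : Prop := out = longConsecutive_alt nums
instance (nums : List Int) (out : Int) : Decidable (Spec_longConsecutive nums out) := by unfold Spec_longConsecutive; infer_instance

-- ===== CLAIM (what is proved, stated in full; the proofs are below) =====
def Claim_equal_longConsecutive : Prop := ∀ (nums : List Int), Dom_longConsecutive nums → Spec_longConsecutive nums (longConsecutive nums)

-- ===== LEMMAS AND PROOFS =====

-- the common value: for each element, the number of later occurrences of its successor
def pairsA : List Int → Int
  | [] => 0
  | x :: xs => (xs.count (x + 1) : Int) + pairsA xs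

theorem pairsA_snoc (xs : List Int) (x : Int) :
    pairsA (xs ++ [x]) = pairsA xs + (xs.count (x - 1) : Int) := by
  induction xs with
  | nil => simp [pairsA]
  | cons y ys ih =>
    simp only [List.cons_append, pairsA, ih, List.count_append, List.count_cons,
      List.count_nil, beq_iff_eq]
    split_ifs with h1 h2 h2 <;> push_cast <;> omega

-- B's fold carries (counter of the prefix, pairsA of the prefix)
theorem alt_inv (nums : List Int) :
    nums.foldl (fun (st : PySem.Dict Int Int × Int) x =>
        (st.1.insert x (st.1.getD x 0 + 1), st.2 + st.1.getD (x - 1) 0))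
      (PySem.Dict.empty, 0)
    = (nums.foldl (fun d x => d.insert x (d.getD x 0 + 1)) PySem.Dict.empty,
       pairsA nums) := by
  induction nums using List.reverseRecOn with
  | nil => simp [pairsA]
  | append_singleton xs x ih =>
    simp only [List.foldl_append, List.foldl_cons, List.foldl_nil, ih]
    refine Prod.ext rfl ?_
    simp only [pairsA_snoc]
    have := PySem.Dict.getD_foldl_insert_add_one xs (PySem.Dict.empty (κ := Int) (ν := Int)) (x - 1)
    simp only [PySem.Dict.getD_empty, zero_add] at this
    simp [this]

theorem alt_eq_pairsA (nums : List Int) : longConsecutive_alt nums = pairsA nums := by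
  simp [longConsecutive_alt, alt_inv]

-- the index-free form of A's per-element count
theorem sum_range_eq_pairsA (nums : List Int) :
    ((List.range nums.length).map (fun k : Nat =>
      ((nums.drop (k + 1)).count (nums.getD k 0 + 1) : Int))).sum = pairsA nums := by
  induction nums with
  | nil => simp [pairsA]
  | cons x xs ih =>
    rw [List.length_cons, List.range_succ_eq_map, List.map_cons, List.map_map, List.sum_cons]
    rw [show pairsA (x :: xs) = (xs.count (x + 1) : Int) + pairsA xs from rfl]
    congr 1

theorem a_eq_pairsA (nums : List Int) : longConsecutive nums = pairsA nums := by
  show (PySem.List.pyRange 0 (PySem.List.len (PySem.List.sorted nums (fun x => x) false)) 1).foldl _ 0 = _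
  have hlen : PySem.List.len (PySem.List.sorted nums (fun x => x) false) = PySem.List.len nums := by
    simp [PySem.List.len_eq, PySem.List.length_sorted]
  rw [hlen]
  have hinner : ∀ (i result : Int), 0 ≤ i →
      (PySem.List.pyRange (i + 1) (PySem.List.len nums) 1).foldl (fun result j =>
        if PySem.List.pyGetD nums i 0 + 1 = PySem.List.pyGetD nums j 0 then result + 1
        else result) result
      = result + ((nums.drop (i + 1).toNat).count (PySem.List.pyGetD nums i 0 + 1) : Int) := by
    intro i result hi
    rw [PySem.List.foldl_pyRange_pyGetD nums 0
      (fun result v => if PySem.List.pyGetD nums i 0 + 1 = v then result + 1 else result)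
      result (a := i + 1) (by omega)]
    rw [PySem.List.foldl_ite_add_one (fun v => PySem.List.pyGetD nums i 0 + 1 = v)]
    congr 2
    rw [List.count_eq_countP]
    apply List.countP_congr
    intro v _
    simp only [beq_iff_eq, decide_eq_true_eq]
    exact eq_comm
  have hcong : (PySem.List.pyRange 0 (PySem.List.len nums) 1).foldl (fun result i =>
      (PySem.List.pyRange (i + 1) (PySem.List.len nums) 1).foldl (fun result j =>
        if PySem.List.pyGetD nums i 0 + 1 = PySem.List.pyGetD nums j 0 then result + 1
        else result) result) 0
    = (PySem.List.pyRange 0 (PySem.List.len nums) 1).foldl (fun result i =>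
        result + ((nums.drop (i + 1).toNat).count (PySem.List.pyGetD nums i 0 + 1) : Int)) 0 := by
    apply PySem.List.foldl_congr_mem
    intro acc i hi
    have h0 : 0 ≤ i := by
      have := (PySem.List.mem_pyRange_one (a := 0) (b := PySem.List.len nums) (x := i)).mp hi
      omega
    exact hinner i acc h0
  rw [hcong, PySem.List.foldl_add
    (g := fun i => ((nums.drop (i + 1).toNat).count (PySem.List.pyGetD nums i 0 + 1) : Int)),
    zero_add]
  rw [← sum_range_eq_pairsA nums]
  rw [PySem.List.len_eq, PySem.List.pyRange_zero_nat, List.map_map]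
  apply congrArg
  apply List.map_congr_left
  intro k hk
  have h1 : ((k : Int) + 1).toNat = k + 1 := by omega
  simp only [Function.comp, h1, PySem.List.pyGetD_natCast]

-- ===== VERDICT (by name: the statement is the Claim_ definition above) =====
theorem longConsecutive_spec : Claim_equal_longConsecutive := by
  intro nums _
  unfold Spec_longConsecutive
  rw [a_eq_pairsA, alt_eq_pairsA]
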